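-- pv_equiv track=rewrite | github.com/ElevenPaths/FARO | faro/detector.py | _get_unique_ents
-- ===== SOURCE A (Python) =====
-- def _get_unique_ents(ent_list):
--     """ Process the entities to obtain a json object """
--     unique_ent_dict = {}
--     for _ent in ent_list:
--         if _ent[1] not in unique_ent_dict:
--             unique_ent_dict[_ent[1]] = {}
--         if _ent[0] not in unique_ent_dict[_ent[1]]:
--             unique_ent_dict[_ent[1]][_ent[0]] = 0
--         unique_ent_dict[_ent[1]][_ent[0]] += 1
--     return unique_ent_dict
-- ===== SOURCE B (Python) =====
-- def _get_unique_ents(ent_list):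
--     """Count-then-reshape: one flat (type, value) count pass, then build the nested dict."""
--     cnt = {}
--     for val, typ in ent_list:
--         key = (typ, val)
--         cnt[key] = cnt.get(key, 0) + 1
--     result = {}
--     for (typ, val), c in cnt.items():
--         result.setdefault(typ, {})[val] = c
--     return result
-- ===== Notes on version B (the rewrite author's own statement) =====
-- stated objective: alternative
-- what changed: Replaces the single interleaved nested-dict-building pass by a two-phase count-then-reshape: one flat pass counts (type, value) pairs in a plain dict, then a second loop over the counts populates the nested dict via setdefault.
import Mathlib
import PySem

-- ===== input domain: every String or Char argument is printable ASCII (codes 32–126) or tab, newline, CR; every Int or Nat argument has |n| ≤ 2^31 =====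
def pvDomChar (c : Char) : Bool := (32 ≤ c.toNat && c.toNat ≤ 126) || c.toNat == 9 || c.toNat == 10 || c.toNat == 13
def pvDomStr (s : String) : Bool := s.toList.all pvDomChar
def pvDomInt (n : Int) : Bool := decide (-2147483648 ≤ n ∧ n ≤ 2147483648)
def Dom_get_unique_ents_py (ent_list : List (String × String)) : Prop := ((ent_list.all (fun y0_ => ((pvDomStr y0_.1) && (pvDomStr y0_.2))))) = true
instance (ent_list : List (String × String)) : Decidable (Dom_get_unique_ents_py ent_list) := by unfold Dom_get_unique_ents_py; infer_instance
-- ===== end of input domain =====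

-- B replaces A's interleaved nested-dict build by a two-phase count-then-reshape pass (same cost, different decomposition).

-- ===== PORT A =====
def get_unique_ents_py (ent_list : List (String × String)) : List (String × List (String × Int)) :=
  let unique_ent_dict :=
    ent_list.foldl (fun d e =>
      let d := if d.contains e.2 then d else d.insert e.2 (PySem.Dict.empty : PySem.Dict String Int)
      let inner := d.getD e.2 PySem.Dict.empty
      let inner := if inner.contains e.1 then inner else inner.insert e.1 (0 : Int)
      d.insert e.2 (inner.insert e.1 (inner.getD e.1 0 + 1)))
      (PySem.Dict.empty : PySem.Dict String (PySem.Dict String Int))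
  unique_ent_dict.items.map (fun p => (p.1, p.2.items))

-- ===== PORT B =====
def get_unique_ents_py_alt (ent_list : List (String × String)) : List (String × List (String × Int)) :=
  let cnt : PySem.Dict (String × String) Int :=
    ent_list.foldl (fun d e => d.insert (e.2, e.1) (d.getD (e.2, e.1) 0 + 1)) PySem.Dict.empty
  let result : PySem.Dict String (PySem.Dict String Int) :=
    cnt.items.foldl (fun r p =>
      r.insert p.1.1 ((r.getD p.1.1 PySem.Dict.empty).insert p.1.2 p.2)) PySem.Dict.empty
  result.items.map (fun p => (p.1, p.2.items))

-- ===== PRECONDITION & SPEC =====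
def Spec_get_unique_ents_py (ent_list : List (String × String)) (out : List (String × List (String × Int))) : Prop := out = get_unique_ents_py_alt ent_list
instance (ent_list : List (String × String)) (out : List (String × List (String × Int))) : Decidable (Spec_get_unique_ents_py ent_list out) := by unfold Spec_get_unique_ents_py; infer_instance

-- ===== CLAIM (what is proved, stated in full; the proofs are below) =====
def Claim_equal_get_unique_ents_py : Prop := ∀ (ent_list : List (String × String)), Dom_get_unique_ents_py ent_list → Spec_get_unique_ents_py ent_list (get_unique_ents_py ent_list)

-- ===== LEMMAS AND PROOFS =====

-- named copies of the two loop bodies and the derived lists (for the proofs)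
def pvStepA (d : PySem.Dict String (PySem.Dict String Int)) (e : String × String) :
    PySem.Dict String (PySem.Dict String Int) :=
  let d := if d.contains e.2 then d else d.insert e.2 (PySem.Dict.empty : PySem.Dict String Int)
  let inner := d.getD e.2 PySem.Dict.empty
  let inner := if inner.contains e.1 then inner else inner.insert e.1 (0 : Int)
  d.insert e.2 (inner.insert e.1 (inner.getD e.1 0 + 1))

def pvF (i : PySem.Dict String Int) (e : String × String) : PySem.Dict String Int :=
  i.insert e.1 (i.getD e.1 0 + 1)

def pvStep2 (r : PySem.Dict String (PySem.Dict String Int)) (p : (String × String) × Int) :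
    PySem.Dict String (PySem.Dict String Int) :=
  r.insert p.1.1 ((r.getD p.1.1 PySem.Dict.empty).insert p.1.2 p.2)

def pvG (e : String × String) : String × String := (e.2, e.1)

def pvKs (l : List (String × String)) : List (String × String) := l.map pvG

def pvVs (l : List (String × String)) (t : String) : List String :=
  (l.filter (fun e => e.2 == t)).map Prod.fst

def pvM (l : List (String × String)) : List ((String × String) × Int) :=
  (PySem.Set.ofList (pvKs l)).map (fun k => (k, (List.count k (pvKs l) : Int)))

theorem pvA_eq (l : List (String × String)) :
    get_unique_ents_py l = (l.foldl pvStepA PySem.Dict.empty).items.map (fun p => (p.1, p.2.items)) := rfl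

-- A's step is a single keyed insert of an updated inner dict
theorem pvStepA_insert (d : PySem.Dict String (PySem.Dict String Int)) (e : String × String) :
    pvStepA d e = d.insert e.2 (pvF (d.getD e.2 PySem.Dict.empty) e) := by
  unfold pvStepA pvF
  by_cases h : d.contains e.2
  · simp only [h, if_true]
    by_cases h2 : (d.getD e.2 PySem.Dict.empty).contains e.1
    · simp [h2]
    · have hb2 : (d.getD e.2 PySem.Dict.empty).contains e.1 = false := by simpa using h2
      have h0 : (d.getD e.2 PySem.Dict.empty).getD e.1 0 = 0 :=
        PySem.Dict.getD_of_not_contains _ _ hb2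
      simp [hb2, h0, PySem.Dict.getD_insert_self, PySem.Dict.insert_insert_self]
  · have hb : d.contains e.2 = false := by simpa using h
    have h0 : d.getD e.2 PySem.Dict.empty = PySem.Dict.empty :=
      PySem.Dict.getD_of_not_contains _ _ hb
    simp [hb, h0, PySem.Dict.getD_insert_self, PySem.Dict.insert_insert_self,
      PySem.Dict.contains_empty, PySem.Dict.getD_empty]

theorem pvStepA_funext :
    pvStepA = fun d (e : String × String) => d.insert e.2 (pvF (d.getD e.2 PySem.Dict.empty) e) :=
  funext fun d => funext fun e => pvStepA_insert d e

-- getD of a keyed-insert fold is a fold of the matching elements over the inner dict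
theorem pv_getD_foldl {α : Type} (key : α → String) (F : PySem.Dict String Int → α → PySem.Dict String Int)
    (l : List α) (r : PySem.Dict String (PySem.Dict String Int)) (t : String) :
    (l.foldl (fun r a => r.insert (key a) (F (r.getD (key a) PySem.Dict.empty) a)) r).getD t PySem.Dict.empty
      = (l.filter (fun a => key a == t)).foldl F (r.getD t PySem.Dict.empty) := by
  induction l generalizing r with
  | nil => rfl
  | cons a l ih =>
    simp only [List.foldl_cons, List.filter_cons]
    rw [ih]
    by_cases h : key a = t
    · subst h
      simp [PySem.Dict.getD_insert_self]
    · simp [PySem.Dict.getD_insert_of_ne _ _ _ (Ne.symm h), h]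

-- PySem.Set.ofList commutes with a final map / with filter / with an injective map
theorem pv_sof_map {α β : Type} [BEq α] [LawfulBEq α] [BEq β] [LawfulBEq β] (f : α → β) (xs : List α) :
    PySem.Set.ofList ((PySem.Set.ofList xs).map f) = PySem.Set.ofList (xs.map f) := by
  induction xs using List.reverseRecOn with
  | nil => rfl
  | append_singleton xs x ih =>
    rw [PySem.Set.ofList_append_singleton, List.map_append, List.map_singleton,
      PySem.Set.ofList_append_singleton]
    by_cases hx : x ∈ PySem.Set.ofList xs
    · rw [PySem.Set.add_of_mem hx, ih]
      have hx' : x ∈ xs := (PySem.Set.mem_ofList _ _).mp hx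
      exact (PySem.Set.add_of_mem ((PySem.Set.mem_ofList _ _).mpr (List.mem_map_of_mem hx'))).symm
    · rw [PySem.Set.add_of_not_mem hx, List.map_append, List.map_singleton,
        PySem.Set.ofList_append_singleton, ih]

theorem pv_sof_filter {α : Type} [BEq α] [LawfulBEq α] (p : α → Bool) (xs : List α) :
    (PySem.Set.ofList xs).filter p = PySem.Set.ofList (xs.filter p) := by
  induction xs using List.reverseRecOn with
  | nil => rfl
  | append_singleton xs x ih =>
    rw [PySem.Set.ofList_append_singleton, List.filter_append]
    by_cases hx : x ∈ PySem.Set.ofList xs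
    · rw [PySem.Set.add_of_mem hx, ih]
      by_cases hp : p x
      · have hxf : x ∈ xs.filter p :=
          List.mem_filter.mpr ⟨(PySem.Set.mem_ofList _ _).mp hx, hp⟩
        rw [show List.filter p [x] = [x] by simp [hp],
          PySem.Set.ofList_append_singleton,
          PySem.Set.add_of_mem ((PySem.Set.mem_ofList _ _).mpr hxf)]
      · simp [List.filter, hp]
    · rw [PySem.Set.add_of_not_mem hx, List.filter_append, ih]
      by_cases hp : p x
      · have hxf : x ∉ PySem.Set.ofList (xs.filter p) := by
          intro hmem
          exact hx ((PySem.Set.mem_ofList _ _).mpr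
            (List.mem_filter.mp ((PySem.Set.mem_ofList _ _).mp hmem)).1)
        rw [show List.filter p [x] = [x] by simp [hp],
          PySem.Set.ofList_append_singleton, PySem.Set.add_of_not_mem hxf]
      · simp [List.filter, hp]

theorem pv_sof_map_inj {α β : Type} [BEq α] [LawfulBEq α] [BEq β] [LawfulBEq β] (f : α → β)
    (hf : Function.Injective f) (xs : List α) :
    PySem.Set.ofList (xs.map f) = (PySem.Set.ofList xs).map f := by
  induction xs using List.reverseRecOn with
  | nil => rfl
  | append_singleton xs x ih =>
    rw [List.map_append, List.map_singleton, PySem.Set.ofList_append_singleton,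
      PySem.Set.ofList_append_singleton, ih]
    by_cases hx : x ∈ PySem.Set.ofList xs
    · rw [PySem.Set.add_of_mem hx, PySem.Set.add_of_mem (List.mem_map_of_mem hx)]
    · have hfx : f x ∉ (PySem.Set.ofList xs).map f := by
        intro hmem
        obtain ⟨y, hy, hfy⟩ := List.mem_map.mp hmem
        exact hx (hf hfy ▸ hy)
      rw [PySem.Set.add_of_not_mem hx, PySem.Set.add_of_not_mem hfx, List.map_append,
        List.map_singleton]

-- counting (t, v) among the swapped pairs is counting v among the values of type t
theorem pv_count (l : List (String × String)) (t : String) (v : String) :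
    List.count (t, v) (pvKs l) = List.count v (pvVs l t) := by
  unfold pvKs pvVs pvG
  rw [List.count_eq_countP, List.count_eq_countP, List.countP_map, List.countP_map,
    List.countP_filter]
  refine List.countP_congr fun e _ => ?_
  simp [Function.comp, Prod.ext_iff, and_comm]

-- ==== characterization of A's dict ====

theorem pvA_keys (l : List (String × String)) :
    (l.foldl pvStepA PySem.Dict.empty).keys = PySem.Set.ofList (l.map Prod.snd) := by
  rw [pvStepA_funext,
    PySem.Dict.keys_foldl_insert_key l Prod.snd (fun d e => pvF (d.getD e.2 PySem.Dict.empty) e),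
    PySem.Dict.keys_empty, PySem.Set.update_nil_left]

theorem pvA_nodup (l : List (String × String)) :
    (l.foldl pvStepA PySem.Dict.empty).keys.Nodup := by
  rw [pvStepA_funext]
  exact PySem.Dict.nodup_keys_foldl_insert_key l Prod.snd _ _ (by simp [PySem.Dict.keys_empty])

theorem pvA_getD (l : List (String × String)) (t : String) :
    (l.foldl pvStepA PySem.Dict.empty).getD t PySem.Dict.empty = PySem.Dict.counter (pvVs l t) := by
  rw [pvStepA_funext, pv_getD_foldl Prod.snd pvF l PySem.Dict.empty t, PySem.Dict.getD_empty]
  rw [← PySem.Dict.foldl_insert_getD_add_one_eq_counter, pvVs, List.foldl_map]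
  rfl

-- ==== characterization of B's dict ====

theorem pvB_cnt (l : List (String × String)) :
    l.foldl (fun d e => d.insert (e.2, e.1) (d.getD (e.2, e.1) 0 + 1)) PySem.Dict.empty
      = PySem.Dict.counter (pvKs l) := by
  rw [← PySem.Dict.foldl_insert_getD_add_one_eq_counter, pvKs, List.foldl_map]
  rfl

theorem pvB_eq (l : List (String × String)) :
    get_unique_ents_py_alt l = ((pvM l).foldl pvStep2 PySem.Dict.empty).items.map (fun p => (p.1, p.2.items)) := by
  show ((l.foldl (fun d e => d.insert (e.2, e.1) (d.getD (e.2, e.1) 0 + 1)) PySem.Dict.empty).items.foldl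
      pvStep2 PySem.Dict.empty).items.map (fun p => (p.1, p.2.items)) = _
  rw [pvB_cnt, PySem.Dict.items_counter]
  rfl

theorem pvB_keys (l : List (String × String)) :
    ((pvM l).foldl pvStep2 PySem.Dict.empty).keys = PySem.Set.ofList (l.map Prod.snd) := by
  rw [show pvStep2 = fun r (p : (String × String) × Int) =>
        r.insert p.1.1 ((r.getD p.1.1 PySem.Dict.empty).insert p.1.2 p.2) from rfl,
    PySem.Dict.keys_foldl_insert_key (pvM l) (fun p => p.1.1)
      (fun r p => (r.getD p.1.1 PySem.Dict.empty).insert p.1.2 p.2),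
    PySem.Dict.keys_empty, PySem.Set.update_nil_left]
  have h1 : (pvM l).map (fun p => p.1.1) = (PySem.Set.ofList (pvKs l)).map Prod.fst := by
    unfold pvM; rw [List.map_map]; rfl
  rw [h1, pv_sof_map Prod.fst (pvKs l)]
  have h2 : (pvKs l).map Prod.fst = l.map Prod.snd := by
    unfold pvKs pvG; rw [List.map_map]; rfl
  rw [h2]

theorem pvB_nodup (l : List (String × String)) :
    ((pvM l).foldl pvStep2 PySem.Dict.empty).keys.Nodup := by
  exact PySem.Dict.nodup_keys_foldl_insert_key (pvM l) (fun p => p.1.1)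
    (fun r p => (r.getD p.1.1 PySem.Dict.empty).insert p.1.2 p.2) _ (by simp [PySem.Dict.keys_empty])

theorem pvB_getD (l : List (String × String)) (t : String) :
    ((pvM l).foldl pvStep2 PySem.Dict.empty).getD t PySem.Dict.empty = PySem.Dict.counter (pvVs l t) := by
  rw [show pvStep2 = fun r (p : (String × String) × Int) =>
        r.insert p.1.1 ((r.getD p.1.1 PySem.Dict.empty).insert p.1.2 p.2) from rfl,
    pv_getD_foldl (fun p => p.1.1) (fun i p => i.insert p.1.2 p.2) (pvM l) PySem.Dict.empty t,
    PySem.Dict.getD_empty]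
  -- reduce the filtered item list to an injective map over the distinct values of type t
  have hfil : (pvM l).filter (fun p => p.1.1 == t)
      = ((PySem.Set.ofList (pvVs l t)).map (fun v => (t, v))).map
          (fun k => (k, (List.count k (pvKs l) : Int))) := by
    unfold pvM
    rw [List.filter_map]
    have hkeys : (PySem.Set.ofList (pvKs l)).filter
          ((fun p => p.1.1 == t) ∘ (fun k => (k, (List.count k (pvKs l) : Int))))
        = (PySem.Set.ofList (pvVs l t)).map (fun v => (t, v)) := by
      have : ((fun (p : (String × String) × Int) => p.1.1 == t) ∘
          (fun k => (k, (List.count k (pvKs l) : Int)))) = fun (k : String × String) => k.1 == t := rfl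
      rw [this, pv_sof_filter]
      have hlist : (pvKs l).filter (fun k => k.1 == t)
          = (pvVs l t).map (fun v => (t, v)) := by
        unfold pvKs pvVs pvG
        rw [List.filter_map, List.map_map]
        have : ((fun (k : String × String) => k.1 == t) ∘ fun e => (e.2, e.1))
            = fun (e : String × String) => e.2 == t := rfl
        rw [this]
        refine List.map_congr_left fun e he => ?_
        have := (List.mem_filter.mp he).2
        simp only [Function.comp]
        have ht : e.2 = t := by simpa using this
        simp [ht]
      rw [hlist, pv_sof_map_inj (fun v => (t, v)) (fun a b h => by simpa using h)]
    rw [hkeys]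
  rw [hfil, List.foldl_map, List.foldl_map]
  have hstep : (fun (i : PySem.Dict String Int) (v : String) =>
        i.insert v (List.count (t, v) (pvKs l) : Int))
      = fun i v => i.insert v (List.count v (pvVs l t) : Int) := by
    funext i v
    rw [pv_count]
  show (PySem.Set.ofList (pvVs l t)).foldl
      (fun i v => i.insert v (List.count (t, v) (pvKs l) : Int)) PySem.Dict.empty = _
  rw [hstep]
  -- the fold inserts distinct fresh keys: its items are exactly the counter's items
  apply PySem.Dict.ext
  have hfresh := PySem.Dict.items_foldl_insert_fresh (PySem.Set.ofList (pvVs l t))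
    (fun v => v) (fun v => (List.count v (pvVs l t) : Int)) PySem.Dict.empty
    (fun a _ => PySem.Dict.contains_empty a)
    (by simp [PySem.Set.nodup_ofList])
  simp only [] at hfresh
  rw [hfresh, PySem.Dict.items_counter]
  rfl

-- ===== VERDICT (by name: the statement is the Claim_ definition above) =====
theorem get_unique_ents_py_spec : Claim_equal_get_unique_ents_py := by
  intro l _
  show get_unique_ents_py l = get_unique_ents_py_alt l
  rw [pvA_eq, pvB_eq,
    PySem.Dict.items_eq_map_keys _ (pvA_nodup l) PySem.Dict.empty,
    PySem.Dict.items_eq_map_keys _ (pvB_nodup l) PySem.Dict.empty,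
    pvA_keys, pvB_keys, List.map_map, List.map_map]
  refine List.map_congr_left fun t _ => ?_
  simp only [Function.comp]
  rw [pvA_getD, pvB_getD]
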